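-- pv_equiv track=rewrite | github.com/liyu95/DeepSimulator | pore_model/src/tf_model_component.py | label_remapping
-- ===== SOURCE A (Python) =====
-- def label_remapping(label_list):
-- 	unique_label=list(set(label_list))
-- 	unique_label.sort()
-- 	label_mapping_dict={}
-- 	for i in range(len(unique_label)):
-- 	    label_mapping_dict[unique_label[i]]=i
-- 	label_list_temp=[]
-- 	for i in range(len(label_list)):
-- 	    label_list_temp.append(label_mapping_dict[label_list[i]])
-- 	return label_list_temp
-- ===== SOURCE B (Python) =====
-- def label_remapping(label_list):
-- 	su = sorted(set(label_list))
-- 	def bl(v):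
-- 		lo, hi = 0, len(su)
-- 		while lo < hi:
-- 			mid = (lo + hi) // 2
-- 			if su[mid] < v:
-- 				lo = mid + 1
-- 			else:
-- 				hi = mid
-- 		return lo
-- 	return [bl(v) for v in label_list]
-- ===== Notes on version B (the rewrite author's own statement) =====
-- stated objective: alternative
-- what changed: Replaces A's index-dict build and dict-lookup remap pass by a hand-written binary search over the sorted distinct labels for each element, so no label-to-rank mapping is ever materialized.
import Mathlib
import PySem

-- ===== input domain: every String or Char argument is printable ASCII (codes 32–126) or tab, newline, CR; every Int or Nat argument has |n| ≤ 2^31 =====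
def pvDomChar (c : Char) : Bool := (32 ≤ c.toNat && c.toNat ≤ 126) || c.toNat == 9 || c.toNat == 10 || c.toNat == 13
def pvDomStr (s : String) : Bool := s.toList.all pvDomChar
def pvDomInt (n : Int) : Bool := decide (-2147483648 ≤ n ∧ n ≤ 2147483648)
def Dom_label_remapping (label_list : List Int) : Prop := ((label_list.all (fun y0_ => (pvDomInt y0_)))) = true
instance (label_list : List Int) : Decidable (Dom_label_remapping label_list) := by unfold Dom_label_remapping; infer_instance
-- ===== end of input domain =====

-- B replaces A's index-dict build + remap passes by a per-element hand-written
-- binary search on the sorted distinct labels (alternative decomposition, no dict).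

-- ===== PORT A =====
def label_remapping (label_list : List Int) : List Int :=
  let unique_label := PySem.List.sorted (PySem.Set.ofList label_list) (fun x => x) false
  let label_mapping_dict :=
    (PySem.List.pyRange 0 (PySem.List.len unique_label) 1).foldl
      (fun d i => d.insert (PySem.List.pyGetD unique_label i 0) i) PySem.Dict.empty
  (PySem.List.pyRange 0 (PySem.List.len label_list) 1).foldl
    (fun acc i => acc ++ [label_mapping_dict.getD (PySem.List.pyGetD label_list i 0) 0]) []

-- ===== PORT B =====
-- Source B's hand-written while-loop binary search 'bl' (su[mid] is always in range
-- when hi ≤ len su, so the in-range getD is exact).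
def labelBisect (su : List Int) (v : Int) (lo hi : Nat) : Nat :=
  if h : lo < hi then
    let mid := (lo + hi) / 2
    if su.getD mid 0 < v then labelBisect su v (mid + 1) hi
    else labelBisect su v lo mid
  else lo
termination_by hi - lo
decreasing_by all_goals omega

def label_remapping_alt (label_list : List Int) : List Int :=
  let su := PySem.List.sorted (PySem.Set.ofList label_list) (fun x => x) false
  label_list.map (fun v => ((labelBisect su v 0 su.length : Nat) : Int))

-- ===== PRECONDITION & SPEC =====
def Spec_label_remapping (label_list : List Int) (out : List Int) : Prop := out = label_remapping_alt label_list
instance (label_list : List Int) (out : List Int) : Decidable (Spec_label_remapping label_list out) := by unfold Spec_label_remapping; infer_instance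

-- ===== CLAIM (what is proved, stated in full; the proofs are below) =====
def Claim_equal_label_remapping : Prop := ∀ (label_list : List Int), Dom_label_remapping label_list → Spec_label_remapping label_list (label_remapping label_list)

-- ===== LEMMAS AND PROOFS =====

-- In a strictly increasing list, the number of elements below u[k] is k.
theorem rank_of_sorted (u : List Int) (hp : u.Pairwise (· < ·)) :
    ∀ (k : Nat) (hk : k < u.length), u.countP (fun x => decide (x < u[k])) = k := by
  induction u with
  | nil => intro k hk; simp at hk
  | cons a t ih =>
    intro k hk
    rcases List.pairwise_cons.mp hp with ⟨ha, ht⟩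
    cases k with
    | zero =>
      simp only [List.getElem_cons_zero, List.countP_cons]
      rw [List.countP_eq_zero.mpr]
      · simp
      · intro x hx
        simp only [decide_eq_true_eq]
        exact not_lt.mpr (le_of_lt (ha x hx))
    | succ k =>
      have hk' : k < t.length := by simpa using hk
      have hlt : a < t[k] := ha _ (List.getElem_mem hk')
      simp [hlt]
      exact ih ht k hk'

-- In a strictly increasing list, x < v holds exactly on the prefix of length countP (· < v).
theorem sorted_lt_iff_lt_countP (u : List Int) (hp : u.Pairwise (· < ·)) (v : Int) :
    ∀ (j : Nat) (hj : j < u.length), (u[j] < v ↔ j < u.countP (fun x => decide (x < v))) := by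
  induction u with
  | nil => intro j hj; simp at hj
  | cons a t ih =>
    intro j hj
    rcases List.pairwise_cons.mp hp with ⟨ha, ht⟩
    by_cases hav : a < v
    · cases j with
      | zero => simp [hav]
      | succ j =>
        have hj' : j < t.length := by simpa using hj
        simpa [List.countP_cons, hav] using ih ht j hj'
    · have htz : t.countP (fun x => decide (x < v)) = 0 := by
        apply List.countP_eq_zero.mpr
        intro x hx
        simp only [decide_eq_true_eq]
        exact not_lt.mpr (le_of_lt (lt_of_le_of_lt (not_lt.mp hav) (ha x hx)))
      cases j with
      | zero => simp [hav, htz]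
      | succ j =>
        have hj' : j < t.length := by simpa using hj
        have : ¬ t[j] < v :=
          not_lt.mpr (le_of_lt (lt_of_le_of_lt (not_lt.mp hav) (ha _ (List.getElem_mem hj'))))
        simp [hav, htz, this]

-- The binary search returns countP (· < v) on a strictly increasing list.
theorem bisect_eq_countP (u : List Int) (hp : u.Pairwise (· < ·)) (v : Int) :
    ∀ (n lo hi : Nat), hi - lo ≤ n → lo ≤ u.countP (fun x => decide (x < v)) →
      u.countP (fun x => decide (x < v)) ≤ hi → hi ≤ u.length →
      labelBisect u v lo hi = u.countP (fun x => decide (x < v)) := by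
  intro n
  induction n with
  | zero =>
    intro lo hi h1 h2 h3 h4
    rw [labelBisect]
    have : ¬ lo < hi := by omega
    simp [this]
    omega
  | succ n ih =>
    intro lo hi h1 h2 h3 h4
    rw [labelBisect]
    by_cases h : lo < hi
    · have hmid : (lo + hi) / 2 < u.length := by omega
      have hget : u.getD ((lo + hi) / 2) 0 = u[(lo + hi) / 2] := List.getD_eq_getElem u 0 hmid
      simp only [h, dif_pos, hget]
      by_cases hv : u[(lo + hi) / 2] < v
      · have hc : (lo + hi) / 2 < u.countP (fun x => decide (x < v)) :=
          (sorted_lt_iff_lt_countP u hp v _ hmid).mp hv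
        simp only [hv, if_pos]
        exact ih _ hi (by omega) (by omega) h3 h4
      · have hc : u.countP (fun x => decide (x < v)) ≤ (lo + hi) / 2 := by
          by_contra hcc
          exact hv ((sorted_lt_iff_lt_countP u hp v _ hmid).mpr (by omega))
        simp only [hv, if_false]
        exact ih lo _ (by omega) h2 hc (by omega)
    · simp [h]
      omega

-- The index dict built by A maps each element of u (Nodup) to its index, as an Int.
theorem dict_getD_eq_index (u : List Int) (hnd : u.Nodup) (k : Nat) (hk : k < u.length) :
    ((List.range u.length).foldl
        (fun d j => d.insert (u.getD j 0) ((j : Int))) PySem.Dict.empty).getD u[k] 0 = (k : Int) := by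
  have hmapkeys : (List.range u.length).map (fun j => u.getD j 0) = u := by
    apply List.ext_getElem
    · simp
    · intro i h1 h2
      simp [List.getD_eq_getElem?_getD, List.getElem?_eq_getElem h2]
  have hitems : ((List.range u.length).foldl
      (fun d j => d.insert (u.getD j 0) ((j : Int))) PySem.Dict.empty).items
      = (List.range u.length).map (fun j => (u.getD j 0, (j : Int))) := by
    have h := PySem.Dict.items_foldl_insert_fresh (l := List.range u.length)
      (k := fun j => u.getD j 0) (v := fun j => ((j : Int))) (d := PySem.Dict.empty)
      (by intro a _; simp [PySem.Dict.contains_empty]) (by rw [hmapkeys]; exact hnd)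
    simpa using h
  have hkeysnd : ((List.range u.length).foldl
      (fun d j => d.insert (u.getD j 0) ((j : Int))) PySem.Dict.empty).keys.Nodup := by
    exact PySem.Dict.nodup_keys_foldl_insert_key _ _ _ _ PySem.Dict.nodup_keys_empty
  refine PySem.Dict.getD_of_mem_items _ ?_ hkeysnd 0
  rw [hitems]
  have : (u[k], (k : Int)) ∈ (List.range u.length).map (fun j => (u.getD j 0, (j : Int))) := by
    refine List.mem_map.mpr ⟨k, List.mem_range.mpr hk, ?_⟩
    simp [List.getD_eq_getElem?_getD, List.getElem?_eq_getElem hk]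
  simpa using this

-- ===== VERDICT (by name: the statement is the Claim_ definition above) =====
theorem label_remapping_spec : Claim_equal_label_remapping := by
  intro xs _
  unfold Spec_label_remapping label_remapping label_remapping_alt
  dsimp only
  set s := PySem.Set.ofList xs with hs
  set u := PySem.List.sorted s (fun x => x) false with hu
  have hperm : u.Perm s := PySem.List.sorted_perm ..
  have hp : u.Pairwise (· < ·) := PySem.List.sorted_ofList_pairwise_lt xs
  have hnd : u.Nodup := hperm.nodup_iff.mpr (PySem.Set.nodup_ofList xs)
  -- normalise the dict-building loop to a fold over List.range
  have hdict : (PySem.List.pyRange 0 (PySem.List.len u) 1).foldl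
      (fun d i => d.insert (PySem.List.pyGetD u i 0) i) PySem.Dict.empty
      = (List.range u.length).foldl
        (fun d j => d.insert (u.getD j 0) ((j : Int))) PySem.Dict.empty := by
    rw [PySem.List.len_eq, PySem.List.pyRange_one]
    simp only [Int.sub_zero, Int.toNat_natCast, List.foldl_map]
    apply PySem.List.foldl_congr_mem
    intro d j hj
    simp [PySem.List.pyGetD_natCast]
  rw [hdict]
  -- normalise A's output loop to a map over xs
  rw [PySem.List.foldl_pyRange_zero_pyGetD xs 0
      (fun acc v => acc ++ [((List.range u.length).foldl
        (fun d j => d.insert (u.getD j 0) ((j : Int))) PySem.Dict.empty).getD v 0]) []]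
  rw [PySem.List.foldl_append_singleton_eq_map]
  simp only [List.nil_append]
  apply List.map_congr_left
  intro v hv
  -- v occurs in u at some index k
  have hvu : v ∈ u := (PySem.List.mem_sorted ..).mpr ((PySem.Set.mem_ofList ..).mpr hv)
  obtain ⟨k, hk, hvk⟩ := List.mem_iff_getElem.mp hvu
  subst hvk
  rw [dict_getD_eq_index u hnd k hk]
  rw [bisect_eq_countP u hp u[k] u.length 0 u.length (by omega) (by omega)
      List.countP_le_length (by omega)]
  rw [rank_of_sorted u hp k hk]
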